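-- pv_equiv track=rewrite | github.com/DavidNorrman/advent-of-code | 2024/22/day22.py | process_price_sequences
-- ===== SOURCE A (Python) =====
-- from collections import deque
--
-- MASK = 2**24 - 1
--
-- def process_price_sequences(secret, iterations, price_sequences):
--     previous_price_diffs = deque(maxlen=4)
--     taken_sequences = set()
--     prev_price = secret % 10
--     for _ in range(iterations):
--         secret = get_next_secret(secret)
--         price = secret % 10
--         price_diff = price - prev_price
--
--         previous_price_diffs.append(price_diff)
--
--         if len(previous_price_diffs) > 3 and tuple(previous_price_diffs) not in taken_sequences:
--             if tuple(previous_price_diffs) not in price_sequences: price_sequences[tuple(previous_price_diffs)] = 0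
--             price_sequences[tuple(previous_price_diffs)] += price
--             taken_sequences.add(tuple(previous_price_diffs))
--         prev_price = price
--     return price_sequences
--
-- def get_next_secret(secret):
--     secret = ((secret << 6) ^ secret) & MASK
--     secret = ((secret >> 5) ^ secret) & MASK
--     secret = ((secret << 11) ^ secret) & MASK
--     return secret
-- ===== SOURCE B (Python) =====
-- MASK = 2**24 - 1
--
-- def get_next_secret(secret):
--     secret = ((secret << 6) ^ secret) & MASK
--     secret = ((secret >> 5) ^ secret) & MASK
--     secret = ((secret << 11) ^ secret) & MASK
--     return secret
--
-- def process_price_sequences(secret, iterations, price_sequences):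
--     # Precompute the whole price sequence, derive the diff list, then fold
--     # over zipped 4-diff windows paired with the price at the window's end.
--     prices = [secret % 10]
--     s = secret
--     for _ in range(iterations):
--         s = get_next_secret(s)
--         prices.append(s % 10)
--     diffs = [b - a for a, b in zip(prices, prices[1:])]
--     seen = set()
--     for w, p in zip(zip(diffs, diffs[1:], diffs[2:], diffs[3:]), prices[4:]):
--         if w not in seen:
--             seen.add(w)
--             price_sequences[w] = price_sequences.get(w, 0) + p
--     return price_sequences
-- ===== Notes on version B (the rewrite author's own statement) =====
-- stated objective: alternative
-- what changed: A scans online with a maxlen-4 deque of diffs, a running prev_price and in-loop window bookkeeping; B first materialises the whole price list from the PRNG, derives the diff list, then folds over zipped 4-diff windows paired with the price at each window's end.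
import Mathlib
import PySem

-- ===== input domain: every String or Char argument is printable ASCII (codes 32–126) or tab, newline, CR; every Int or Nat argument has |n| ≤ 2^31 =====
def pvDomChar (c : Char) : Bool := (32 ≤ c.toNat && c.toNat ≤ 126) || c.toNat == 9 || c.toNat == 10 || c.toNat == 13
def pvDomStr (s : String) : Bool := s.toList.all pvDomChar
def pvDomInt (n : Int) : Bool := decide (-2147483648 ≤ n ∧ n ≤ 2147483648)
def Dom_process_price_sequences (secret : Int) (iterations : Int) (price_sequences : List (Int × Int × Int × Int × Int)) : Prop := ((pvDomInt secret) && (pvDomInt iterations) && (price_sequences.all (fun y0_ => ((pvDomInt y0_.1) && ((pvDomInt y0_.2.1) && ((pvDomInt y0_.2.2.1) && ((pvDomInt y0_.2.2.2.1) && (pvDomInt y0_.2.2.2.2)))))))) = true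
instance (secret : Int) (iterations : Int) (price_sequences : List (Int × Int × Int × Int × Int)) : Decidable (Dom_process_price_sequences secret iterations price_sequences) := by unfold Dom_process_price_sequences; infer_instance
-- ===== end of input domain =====

-- B replaces A's online deque-of-diffs scan by precomputing the full price and diff
-- lists and folding over zipped 4-diff windows (objective: alternative decomposition).
-- The dict argument is MUTATED IN PLACE by both Pythons; equivalence here is about the
-- returned dict value (which is that same dict).

-- ===== PORT A =====
-- shared module helper (both Source A and Source B contain this PRNG step verbatim);
-- '& MASK' / '^' / '<<' / '>>' are Python-exact via PySem.Int bitwise ops and Int's <<< / >>>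
def get_next_secret (secret : Int) : Int :=
  let s1 := PySem.Int.band (PySem.Int.bxor (secret <<< 6) secret) 16777215
  let s2 := PySem.Int.band (PySem.Int.bxor (s1 >>> 5) s1) 16777215
  PySem.Int.band (PySem.Int.bxor (s2 <<< 11) s2) 16777215

-- dict primitives on the flattened association list (key = first four components,
-- first match wins, assignment to a missing key appends): d[k] membership / d.get(k, dflt) / d[k] = v
def dictContains : List (Int × Int × Int × Int × Int) → (Int × Int × Int × Int) → Bool
  | [], _ => false
  | (a, b, c, e, _) :: t, k => if (a, b, c, e) = k then true else dictContains t k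

def dictGetD : List (Int × Int × Int × Int × Int) → (Int × Int × Int × Int) → Int → Int
  | [], _, dflt => dflt
  | (a, b, c, e, v) :: t, k, dflt => if (a, b, c, e) = k then v else dictGetD t k dflt

def dictSet : List (Int × Int × Int × Int × Int) → (Int × Int × Int × Int) → Int → List (Int × Int × Int × Int × Int)
  | [], k, v => [(k.1, k.2.1, k.2.2.1, k.2.2.2, v)]
  | (a, b, c, e, w) :: t, k, v =>
      if (a, b, c, e) = k then (a, b, c, e, v) :: t else (a, b, c, e, w) :: dictSet t k v

-- one iteration of A's loop; state = (secret, deque of ≤4 diffs, taken set, prev_price, dict)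
def aStep (st : Int × List Int × PySem.Set (Int × Int × Int × Int) × Int × List (Int × Int × Int × Int × Int)) :
    Int × List Int × PySem.Set (Int × Int × Int × Int) × Int × List (Int × Int × Int × Int × Int) :=
  match st with
  | (s, dq, taken, prev, d) =>
    let s' := get_next_secret s
    let price := PySem.Int.mod s' 10
    let dq' := if dq.length = 4 then dq.tail ++ [price - prev] else dq ++ [price - prev]  -- deque(maxlen=4).append
    match dq' with
    | [a, b, c, e] =>  -- len(previous_price_diffs) > 3; tuple(previous_price_diffs) = (a,b,c,e)
      if PySem.Set.contains taken (a, b, c, e) then (s', dq', taken, price, d)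
      else
        let d0 := if dictContains d (a, b, c, e) then d else dictSet d (a, b, c, e) 0
        (s', dq', PySem.Set.add taken (a, b, c, e), price,
          dictSet d0 (a, b, c, e) (dictGetD d0 (a, b, c, e) 0 + price))
    | dq' => (s', dq', taken, price, d)

def process_price_sequences (secret : Int) (iterations : Int) (price_sequences : List (Int × Int × Int × Int × Int)) : List (Int × Int × Int × Int × Int) :=
  ((PySem.List.pyRange 0 iterations 1).foldl (fun st _ => aStep st)
    (secret, ([] : List Int), (PySem.Set.empty : PySem.Set (Int × Int × Int × Int)),
      PySem.Int.mod secret 10, price_sequences)).2.2.2.2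

-- ===== PORT B =====
-- price-building loop body: s = get_next_secret(s); prices.append(s % 10)
def bPriceStep (acc : Int × List Int) : Int × List Int :=
  (get_next_secret acc.1, acc.2 ++ [PySem.Int.mod (get_next_secret acc.1) 10])

-- window loop body: if w not in seen: seen.add(w); d[w] = d.get(w, 0) + p
def bStep (acc : PySem.Set (Int × Int × Int × Int) × List (Int × Int × Int × Int × Int))
    (wp : (Int × Int × Int × Int) × Int) :
    PySem.Set (Int × Int × Int × Int) × List (Int × Int × Int × Int × Int) :=
  if PySem.Set.contains acc.1 wp.1 then acc
  else (PySem.Set.add acc.1 wp.1, dictSet acc.2 wp.1 (dictGetD acc.2 wp.1 0 + wp.2))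

def process_price_sequences_alt (secret : Int) (iterations : Int) (price_sequences : List (Int × Int × Int × Int × Int)) : List (Int × Int × Int × Int × Int) :=
  let prices := ((PySem.List.pyRange 0 iterations 1).foldl (fun acc _ => bPriceStep acc)
    (secret, [PySem.Int.mod secret 10])).2
  let diffs := List.zipWith (fun a b => b - a) prices prices.tail
  let windows := List.zip diffs (List.zip diffs.tail (List.zip (diffs.drop 2) (diffs.drop 3)))
  ((List.zip windows (prices.drop 4)).foldl bStep
    ((PySem.Set.empty : PySem.Set (Int × Int × Int × Int)), price_sequences)).2

-- ===== PRECONDITION & SPEC =====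
def Spec_process_price_sequences (secret : Int) (iterations : Int) (price_sequences : List (Int × Int × Int × Int × Int)) (out : List (Int × Int × Int × Int × Int)) : Prop := out = process_price_sequences_alt secret iterations price_sequences
instance (secret : Int) (iterations : Int) (price_sequences : List (Int × Int × Int × Int × Int)) (out : List (Int × Int × Int × Int × Int)) : Decidable (Spec_process_price_sequences secret iterations price_sequences out) := by unfold Spec_process_price_sequences; infer_instance

-- ===== CLAIM (what is proved, stated in full; the proofs are below) =====
def Claim_equal_process_price_sequences : Prop := ∀ (secret : Int) (iterations : Int) (price_sequences : List (Int × Int × Int × Int × Int)), Dom_process_price_sequences secret iterations price_sequences → Spec_process_price_sequences secret iterations price_sequences (process_price_sequences secret iterations price_sequences)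

-- ===== LEMMAS AND PROOFS =====

-- proof-only streams: the prices p1, p2, … and diffs generated from a secret
def pstream (s : Int) : Nat → List Int
  | 0 => []
  | n + 1 => PySem.Int.mod (get_next_secret s) 10 :: pstream (get_next_secret s) n

def dstream (s prev : Int) : Nat → List Int
  | 0 => []
  | n + 1 =>
      (PySem.Int.mod (get_next_secret s) 10 - prev) ::
        dstream (get_next_secret s) (PySem.Int.mod (get_next_secret s) 10) n

-- all length-4 sliding windows of a list
def win4 : List Int → List (Int × Int × Int × Int)
  | a :: b :: c :: e :: t => (a, b, c, e) :: win4 (b :: c :: e :: t)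
  | _ => []

lemma foldl_ignore {α β : Type} (f : β → β) (l : List α) (init : β) :
    l.foldl (fun acc _ => f acc) init = f^[l.length] init := by
  induction l generalizing init with
  | nil => rfl
  | cons x t ih => simpa [Function.iterate_succ_apply] using ih (f init)

lemma dictSet_absent (d : List (Int × Int × Int × Int × Int)) (k : Int × Int × Int × Int) (v : Int)
    (h : dictContains d k = false) : dictSet d k v = d ++ [(k.1, k.2.1, k.2.2.1, k.2.2.2, v)] := by
  induction d with
  | nil => rfl
  | cons p t ih =>
      obtain ⟨a, b, c, e, w⟩ := p
      by_cases hk : (a, b, c, e) = k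
      · simp [dictContains, hk] at h
      · simp [dictSet, hk, ih (by simpa [dictContains, hk] using h)]

lemma dictGetD_absent (d : List (Int × Int × Int × Int × Int)) (k : Int × Int × Int × Int) (dflt : Int)
    (h : dictContains d k = false) : dictGetD d k dflt = dflt := by
  induction d with
  | nil => rfl
  | cons p t ih =>
      obtain ⟨a, b, c, e, w⟩ := p
      by_cases hk : (a, b, c, e) = k
      · simp [dictContains, hk] at h
      · simp [dictGetD, hk, ih (by simpa [dictContains, hk] using h)]

lemma dictGetD_append_absent (d : List (Int × Int × Int × Int × Int)) (k : Int × Int × Int × Int)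
    (v dflt : Int) (h : dictContains d k = false) :
    dictGetD (d ++ [(k.1, k.2.1, k.2.2.1, k.2.2.2, v)]) k dflt = v := by
  induction d with
  | nil => simp [dictGetD]
  | cons p t ih =>
      obtain ⟨a, b, c, e, w⟩ := p
      by_cases hk : (a, b, c, e) = k
      · simp [dictContains, hk] at h
      · simp [dictGetD, hk, ih (by simpa [dictContains, hk] using h)]

lemma dictSet_append_absent (d : List (Int × Int × Int × Int × Int)) (k : Int × Int × Int × Int)
    (v v' : Int) (h : dictContains d k = false) :
    dictSet (d ++ [(k.1, k.2.1, k.2.2.1, k.2.2.2, v)]) k v' = d ++ [(k.1, k.2.1, k.2.2.1, k.2.2.2, v')] := by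
  induction d with
  | nil => simp [dictSet]
  | cons p t ih =>
      obtain ⟨a, b, c, e, w⟩ := p
      by_cases hk : (a, b, c, e) = k
      · simp [dictContains, hk] at h
      · simp [dictSet, hk, ih (by simpa [dictContains, hk] using h)]

-- A's "if absent set 0 then +=" equals B's "set to get(k,0) + p"
lemma dict_bump (d : List (Int × Int × Int × Int × Int)) (k : Int × Int × Int × Int) (p : Int) :
    dictSet (if dictContains d k then d else dictSet d k 0) k
        (dictGetD (if dictContains d k then d else dictSet d k 0) k 0 + p) =
      dictSet d k (dictGetD d k 0 + p) := by
  by_cases h : dictContains d k = true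
  · simp [h]
  · have h' : dictContains d k = false := by simpa using h
    rw [if_neg (by simp [h']),
      dictSet_absent d k 0 h', dictGetD_append_absent d k 0 0 h',
      dictSet_append_absent d k 0 (0 + p) h', dictGetD_absent d k 0 h',
      dictSet_absent d k (0 + p) h']

-- core invariant: once the deque is full, A's remaining run is B's fold over the
-- stream of windows (a,b,c,next diff) paired with the price ending the window
lemma core4 (n : Nat) : ∀ (s prev z a b c : Int) (taken : PySem.Set (Int × Int × Int × Int))
    (d : List (Int × Int × Int × Int × Int)),
    ((aStep^[n] (s, [z, a, b, c], taken, prev, d)).2.2.1,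
        (aStep^[n] (s, [z, a, b, c], taken, prev, d)).2.2.2.2) =
      (List.zip (win4 (a :: b :: c :: dstream s prev n)) (pstream s n)).foldl bStep (taken, d) := by
  induction n with
  | zero => intro s prev z a b c taken d; simp [dstream, pstream, win4]
  | succ m ih =>
      intro s prev z a b c taken d
      rw [Function.iterate_succ_apply]
      simp only [aStep, List.length_cons, List.length_nil, List.tail_cons,
        List.cons_append, List.nil_append, Nat.reduceAdd, if_true]
      simp only [dstream, pstream, win4, List.zip_cons_cons, List.foldl_cons]
      set s' := get_next_secret s with hs'
      set p := PySem.Int.mod s' 10 with hp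
      by_cases hmem : (a, b, c, p - prev) ∈ taken
      · have hc : PySem.Set.contains taken (a, b, c, p - prev) = true :=
          (PySem.Set.contains_iff taken (a, b, c, p - prev)).mpr hmem
        simp only [hc, if_true]
        rw [ih s' p a b c (p - prev) taken d]
        have hb : bStep (taken, d) ((a, b, c, p - prev), p) = (taken, d) := by
          simp [bStep, hmem]
        rw [hb]
      · have hc : PySem.Set.contains taken (a, b, c, p - prev) = false := by
          simpa [PySem.Set.contains_iff] using hmem
        simp only [hc, Bool.false_eq_true, if_false]
        rw [ih s' p a b c (p - prev) (PySem.Set.add taken (a, b, c, p - prev)) _]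
        have hb : bStep (taken, d) ((a, b, c, p - prev), p) =
            (PySem.Set.add taken (a, b, c, p - prev),
              dictSet d (a, b, c, p - prev) (dictGetD d (a, b, c, p - prev) 0 + p)) := by
          simp [bStep, hmem]
        rw [hb, dict_bump]

-- the same with a just-filled deque of three diffs
lemma core3 (n : Nat) (s prev a b c : Int) (taken : PySem.Set (Int × Int × Int × Int))
    (d : List (Int × Int × Int × Int × Int)) :
    ((aStep^[n] (s, [a, b, c], taken, prev, d)).2.2.1,
        (aStep^[n] (s, [a, b, c], taken, prev, d)).2.2.2.2) =
      (List.zip (win4 (a :: b :: c :: dstream s prev n)) (pstream s n)).foldl bStep (taken, d) := by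
  cases n with
  | zero => simp [dstream, pstream, win4]
  | succ m =>
      rw [Function.iterate_succ_apply]
      simp only [aStep, List.length_cons, List.length_nil,
        List.cons_append, List.nil_append, Nat.reduceAdd, Nat.reduceEqDiff, if_false]
      simp only [dstream, pstream, win4, List.zip_cons_cons, List.foldl_cons]
      set s' := get_next_secret s with hs'
      set p := PySem.Int.mod s' 10 with hp
      by_cases hmem : (a, b, c, p - prev) ∈ taken
      · have hc : PySem.Set.contains taken (a, b, c, p - prev) = true :=
          (PySem.Set.contains_iff taken (a, b, c, p - prev)).mpr hmem
        simp only [hc, if_true]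
        rw [core4 m s' p a b c (p - prev) taken d]
        have hb : bStep (taken, d) ((a, b, c, p - prev), p) = (taken, d) := by
          simp [bStep, hmem]
        rw [hb]
      · have hc : PySem.Set.contains taken (a, b, c, p - prev) = false := by
          simpa [PySem.Set.contains_iff] using hmem
        simp only [hc, Bool.false_eq_true, if_false]
        rw [core4 m s' p a b c (p - prev) (PySem.Set.add taken (a, b, c, p - prev)) _]
        have hb : bStep (taken, d) ((a, b, c, p - prev), p) =
            (PySem.Set.add taken (a, b, c, p - prev),
              dictSet d (a, b, c, p - prev) (dictGetD d (a, b, c, p - prev) 0 + p)) := by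
          simp [bStep, hmem]
        rw [hb, dict_bump]

-- B's appending loop builds p0 :: pstream
lemma price_loop (n : Nat) : ∀ (s : Int) (acc : List Int),
    (bPriceStep^[n] (s, acc)).2 = acc ++ pstream s n := by
  induction n with
  | zero => intro s acc; simp [pstream]
  | succ m ih =>
      intro s acc
      rw [Function.iterate_succ_apply]
      show (bPriceStep^[m] (get_next_secret s, acc ++ [PySem.Int.mod (get_next_secret s) 10])).2 = _
      rw [ih]
      simp [pstream]

-- consecutive differences of the price list are the diff stream
lemma diff_stream (n : Nat) : ∀ (s p : Int),
    List.zipWith (fun a b => b - a) (p :: pstream s n) (pstream s n) = dstream s p n := by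
  induction n with
  | zero => intro s p; simp [pstream, dstream]
  | succ m ih =>
      intro s p
      rw [show pstream s (m + 1) =
            PySem.Int.mod (get_next_secret s) 10 :: pstream (get_next_secret s) m from rfl,
          List.zipWith_cons_cons, ih,
          show dstream s p (m + 1) =
            (PySem.Int.mod (get_next_secret s) 10 - p) ::
              dstream (get_next_secret s) (PySem.Int.mod (get_next_secret s) 10) m from rfl]

-- B's zip of four shifted copies is the sliding-window list
lemma zip_win4 : ∀ (l : List Int),
    List.zip l (List.zip l.tail (List.zip (l.drop 2) (l.drop 3))) = win4 l
  | a :: b :: c :: e :: t => by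
      simpa [win4, List.zip_cons_cons] using zip_win4 (b :: c :: e :: t)
  | [] => rfl
  | [_] => rfl
  | [_, _] => rfl
  | [_, _, _] => rfl

theorem pps_eq (secret iterations : Int) (ps : List (Int × Int × Int × Int × Int)) :
    process_price_sequences secret iterations ps = process_price_sequences_alt secret iterations ps := by
  unfold process_price_sequences process_price_sequences_alt
  rw [foldl_ignore aStep, foldl_ignore bPriceStep, price_loop]
  set n := (PySem.List.pyRange 0 iterations 1).length with hn
  set p0 := PySem.Int.mod secret 10 with hp0
  rw [show ([p0] : List Int) ++ pstream secret n = p0 :: pstream secret n from rfl]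
  have hdiff : List.zipWith (fun a b => b - a) (p0 :: pstream secret n) (p0 :: pstream secret n).tail
      = dstream secret p0 n := by
    rw [List.tail_cons, diff_stream]
  dsimp only
  rw [hdiff, zip_win4]
  match n with
  | 0 => simp [dstream, pstream, win4]
  | 1 => simp [aStep, dstream, pstream, win4]
  | 2 => simp [aStep, dstream, pstream, win4, Function.iterate_succ_apply]
  | 3 => simp [aStep, dstream, pstream, win4, Function.iterate_succ_apply]
  | (m + 4) =>
      rw [show m + 4 = m + 1 + 3 from rfl, Function.iterate_add_apply]
      have h3 : aStep^[3] (secret, ([] : List Int), (PySem.Set.empty : PySem.Set (Int × Int × Int × Int)), p0, ps)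
          = (get_next_secret (get_next_secret (get_next_secret secret)),
             [PySem.Int.mod (get_next_secret secret) 10 - p0,
              PySem.Int.mod (get_next_secret (get_next_secret secret)) 10 - PySem.Int.mod (get_next_secret secret) 10,
              PySem.Int.mod (get_next_secret (get_next_secret (get_next_secret secret))) 10 - PySem.Int.mod (get_next_secret (get_next_secret secret)) 10],
             (PySem.Set.empty : PySem.Set (Int × Int × Int × Int)),
             PySem.Int.mod (get_next_secret (get_next_secret (get_next_secret secret))) 10, ps) := by
        simp [Function.iterate_succ_apply, aStep]
      rw [h3]
      have := core3 (m + 1) (get_next_secret (get_next_secret (get_next_secret secret)))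
        (PySem.Int.mod (get_next_secret (get_next_secret (get_next_secret secret))) 10)
        (PySem.Int.mod (get_next_secret secret) 10 - p0)
        (PySem.Int.mod (get_next_secret (get_next_secret secret)) 10 - PySem.Int.mod (get_next_secret secret) 10)
        (PySem.Int.mod (get_next_secret (get_next_secret (get_next_secret secret))) 10 - PySem.Int.mod (get_next_secret (get_next_secret secret)) 10)
        PySem.Set.empty ps
      simp only [dstream, pstream, List.drop_succ_cons, List.drop_zero] at this ⊢
      rw [congrArg Prod.snd this]

-- ===== VERDICT (by name: the statement is the Claim_ definition above) =====
theorem process_price_sequences_spec : Claim_equal_process_price_sequences := by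
  intro secret iterations ps _
  unfold Spec_process_price_sequences
  exact pps_eq secret iterations ps
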